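-- pv_equiv track=rewrite | github.com/pygame/pygame | doc/create_rstref.py | create_example_rst
-- ===== SOURCE A (Python) =====
-- def create_example_rst (example, showex=False):
--     data = ""
--     if showex:
--         data = "  **Example:** ::\n"
--     else:
--         data = "  ::\n"
--
--     cindent = -1
--     for line in example.split ("\n"):
--         line = line.rstrip ()
--
--         if cindent < 0:
--             if len (line) != 0:
--                 # Prepare indentation stuff
--                 cindent = len (line) - len (line.lstrip ())
--
--         if len (line) != 0:
--             # Prepare indentation stuff
--             indent = len (line) - len (line.lstrip ())
--             line = line.lstrip ()
--             if indent > cindent: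
--                 line = " " * (indent - cindent) + line
--
--         data += "    " + line + "\n"
--     return data + "\n"
-- ===== SOURCE B (Python) =====
-- def create_example_rst(example, showex=False):
--     # Index-based scanner: no split()/strip() calls; walks the raw string with
--     # find() and two whitespace-trimming pointers per line, collecting pieces.
--     out = ["  **Example:** ::\n" if showex else "  ::\n"]
--     n = len(example)
--     i = 0
--     cindent = -1
--     while True:
--         j = example.find("\n", i)
--         end = n if j < 0 else j
--         e = end
--         while e > i and example[e - 1].isspace():
--             e -= 1
--         b = i
--         while b < e and example[b].isspace():
--             b += 1
--         if b < e:
--             indent = b - i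
--             if cindent < 0:
--                 cindent = indent
--             pad = indent - cindent if indent > cindent else 0
--             out.append("    " + " " * pad + example[b:e] + "\n")
--         else:
--             out.append("    \n")
--         if j < 0:
--             break
--         i = j + 1
--     out.append("\n")
--     return "".join(out)
-- ===== Notes on version B (the rewrite author's own statement) =====
-- stated objective: alternative
-- what changed: Replaces A's split-into-lines pipeline (str.split on newline, per-line rstrip/lstrip string methods, a mutable cindent flag, string +=) with an index-based scanner over the raw string: str.find locates each line end, two whitespace-trimming pointers delimit each line's body in place, and the pieces are sliced out and joined once.
import Mathlib
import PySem

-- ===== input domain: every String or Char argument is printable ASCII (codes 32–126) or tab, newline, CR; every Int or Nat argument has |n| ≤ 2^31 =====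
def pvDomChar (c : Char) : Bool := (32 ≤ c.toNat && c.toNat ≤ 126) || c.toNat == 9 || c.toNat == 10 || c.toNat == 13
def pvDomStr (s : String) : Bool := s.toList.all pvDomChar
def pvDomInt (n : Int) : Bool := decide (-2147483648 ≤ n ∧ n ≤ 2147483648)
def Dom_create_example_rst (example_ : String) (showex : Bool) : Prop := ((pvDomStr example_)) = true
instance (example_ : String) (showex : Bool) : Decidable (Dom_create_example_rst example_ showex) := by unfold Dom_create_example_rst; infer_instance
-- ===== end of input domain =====

-- B replaces A's split-into-lines + per-line rstrip/lstrip pipeline by an index-based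
-- scanner over the raw string (find('\n') + two trimming pointers per line, pieces
-- joined once); objective: alternative, same cost.

-- ===== PORT A =====
-- " " * n  (Python string repetition; empty for n ≤ 0) — exact
def pvSpaces (n : Int) : String := String.ofList (List.replicate n.toNat ' ')

-- example.split("\n"): sep "\n" is nonempty so split? is always some; .getD [] only totalizes
-- the body of A's for-loop, state = (cindent, data)
def pvAStep (st : Int × String) (line0 : String) : Int × String :=
  let line := PySem.Str.rstrip line0
  let cindent : Int :=
    if st.1 < 0 then
      (if PySem.Str.len line ≠ 0
        then PySem.Str.len line - PySem.Str.len (PySem.Str.lstrip line)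
        else st.1)
    else st.1
  let line :=
    if PySem.Str.len line ≠ 0 then
      let indent := PySem.Str.len line - PySem.Str.len (PySem.Str.lstrip line)
      let line := PySem.Str.lstrip line
      if indent > cindent then pvSpaces (indent - cindent) ++ line else line
    else line
  (cindent, st.2 ++ ("    " ++ line ++ "\n"))

def create_example_rst (example_ : String) (showex : Bool) : String :=
  let data := if showex then "  **Example:** ::\n" else "  ::\n"
  (((PySem.Str.split? example_ "\n").getD []).foldl pvAStep (-1, data)).2 ++ "\n"

-- ===== PORT B =====
-- example.find("\n", i): index of the first '\n' at position ≥ i, -1 if none — exact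
def pvFindNl (l : List Char) (i : Nat) : Int :=
  if h : i < l.length then
    (if l[i] = '\n' then (i : Int) else pvFindNl l (i + 1))
  else -1
termination_by l.length - i

-- '\n' ∈ u bounds the length of its newline-free prefix (used for pvLoop's termination)
theorem pv_takeWhile_lt {u : List Char} (h : '\n' ∈ u) :
    (u.takeWhile (fun c => c != '\n')).length < u.length := by
  rcases Nat.lt_or_ge (u.takeWhile (fun c => c != '\n')).length u.length with hlt | hge
  · exact hlt
  · exfalso
    have hpre := List.takeWhile_prefix (l := u) (fun c => c != '\n')
    have heq : u.takeWhile (fun c => c != '\n') = u :=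
      hpre.eq_of_length (Nat.le_antisymm hpre.length_le hge)
    have := List.takeWhile_eq_self_iff.mp heq _ h
    simp at this

-- characterization of pvFindNl (needed for pvLoop's termination)
theorem pvFindNl_not_mem : ∀ (n : Nat) (l : List Char) (i : Nat), l.length - i ≤ n →
    '\n' ∉ l.drop i → pvFindNl l i = -1 := by
  intro n
  induction n with
  | zero =>
    intro l i hn hm
    rw [pvFindNl]
    have : ¬ i < l.length := by omega
    simp [this]
  | succ n ih =>
    intro l i hn hm
    rw [pvFindNl]
    by_cases hi : i < l.length
    · have hdrop : l.drop i = l[i] :: l.drop (i + 1) := List.drop_eq_getElem_cons hi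
      have hne : ¬ l[i] = '\n' := by
        intro he; exact hm (by rw [hdrop, he]; exact List.mem_cons_self)
      have hm' : '\n' ∉ l.drop (i + 1) := by
        intro hx; exact hm (by rw [hdrop]; exact List.mem_cons_of_mem _ hx)
      simp only [hi, dif_pos, hne, if_neg, not_false_iff]
      exact ih l (i + 1) (by omega) hm'
    · simp [hi]

theorem pvFindNl_mem : ∀ (n : Nat) (l : List Char) (i : Nat), l.length - i ≤ n →
    '\n' ∈ l.drop i →
    pvFindNl l i = (i : Int) + (((l.drop i).takeWhile (fun c => c != '\n')).length : Int) := by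
  intro n
  induction n with
  | zero =>
    intro l i hn hm
    exfalso
    have : l.drop i = [] := by
      apply List.eq_nil_of_length_eq_zero
      simp [List.length_drop]; omega
    rw [this] at hm; exact List.not_mem_nil hm
  | succ n ih =>
    intro l i hn hm
    have hi : i < l.length := by
      by_contra hx
      have : l.drop i = [] := by
        apply List.eq_nil_of_length_eq_zero
        simp [List.length_drop]; omega
      rw [this] at hm; exact List.not_mem_nil hm
    have hdrop : l.drop i = l[i] :: l.drop (i + 1) := List.drop_eq_getElem_cons hi
    rw [pvFindNl]
    by_cases he : l[i] = '\n'
    · have : (l.drop i).takeWhile (fun c => c != '\n') = [] := by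
        rw [hdrop, List.takeWhile_cons, he]; simp
      simp [hi, he, this]
    · have hm' : '\n' ∈ l.drop (i + 1) := by
        rcases List.mem_cons.mp (hdrop ▸ hm) with h | h
        · exact absurd h.symm he
        · exact h
      have htw : (l.drop i).takeWhile (fun c => c != '\n')
          = l[i] :: (l.drop (i + 1)).takeWhile (fun c => c != '\n') := by
        rw [hdrop, List.takeWhile_cons]; simp [he]
      simp only [hi, dif_pos, he, if_neg, not_false_iff]
      rw [ih l (i + 1) (by omega) hm', htw]
      simp; omega

theorem pvFindNl_bounds (l : List Char) (i : Nat) (h : 0 ≤ pvFindNl l i) :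
    i ≤ (pvFindNl l i).toNat ∧ (pvFindNl l i).toNat < l.length := by
  by_cases hm : '\n' ∈ l.drop i
  · have := pvFindNl_mem (l.length - i) l i (le_refl _) hm
    have hlt := pv_takeWhile_lt hm
    have hdl : (l.drop i).length = l.length - i := by simp
    have hi : i < l.length := by
      by_contra hx
      have : l.drop i = [] := by
        apply List.eq_nil_of_length_eq_zero; omega
      rw [this] at hm; exact List.not_mem_nil hm
    rw [this]; constructor <;> omega
  · rw [pvFindNl_not_mem (l.length - i) l i (le_refl _) hm] at h; omega

-- while e > i and example[e-1].isspace(): e -= 1   (getD totalizes l[e-1]; e-1 < len(l) on every call)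
def pvRTrim (l : List Char) (i e : Nat) : Nat :=
  if i < e ∧ PySem.Chars.isspace (l.getD (e - 1) ' ') = true then pvRTrim l i (e - 1) else e
termination_by e
decreasing_by omega

-- while b < e and example[b].isspace(): b += 1   (getD totalizes l[b]; b < len(l) on every call)
def pvLTrim (l : List Char) (b e : Nat) : Nat :=
  if b < e ∧ PySem.Chars.isspace (l.getD b ' ') = true then pvLTrim l (b + 1) e else b
termination_by e - b

-- B's while-True loop: one iteration per line, scanning by absolute index
def pvLoop (l : List Char) (i : Nat) (cindent : Int) (out : List String) : List String :=
  let j := pvFindNl l i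
  let endp : Nat := if j < 0 then l.length else j.toNat
  let e := pvRTrim l i endp
  let b := pvLTrim l i e
  let c : Int := if b < e then (if cindent < 0 then (b : Int) - (i : Int) else cindent) else cindent
  let piece : String :=
    if b < e then
      let indent : Int := (b : Int) - (i : Int)
      let pad : Int := if indent > c then indent - c else 0
      "    " ++ String.ofList (List.replicate pad.toNat ' ')
        ++ String.ofList ((l.drop b).take (e - b)) ++ "\n"
    else "    \n"
  if j < 0 then out ++ [piece] else pvLoop l (j.toNat + 1) c (out ++ [piece])
termination_by l.length + 1 - i
decreasing_by
  have hb := pvFindNl_bounds l i (by omega)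
  omega

def create_example_rst_alt (example_ : String) (showex : Bool) : String :=
  let out := [if showex then "  **Example:** ::\n" else "  ::\n"]
  let out := pvLoop example_.toList 0 (-1) out
  PySem.Str.join "" (out ++ ["\n"])

-- ===== PRECONDITION & SPEC =====
def Spec_create_example_rst (example_ : String) (showex : Bool) (out : String) : Prop := out = create_example_rst_alt example_ showex
instance (example_ : String) (showex : Bool) (out : String) : Decidable (Spec_create_example_rst example_ showex out) := by unfold Spec_create_example_rst; infer_instance

-- ===== CLAIM =====
def Claim_equal_create_example_rst : Prop := ∀ (example_ : String) (showex : Bool), Dom_create_example_rst example_ showex → Spec_create_example_rst example_ showex (create_example_rst example_ showex)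

-- ===== LEMMAS AND PROOFS =====

-- indentation of a (rstripped) line, as chars
def pvInd (u : List Char) : Int := ((u.takeWhile PySem.Chars.isspace).length : Int)

-- cindent update on one line whose rstripped form is s'
def pvCupC (c : Int) (s' : List Char) : Int :=
  if c < 0 ∧ s' ≠ [] then pvInd s' else c

-- the emitted piece for one line whose rstripped form is s', under cindent c
def pvPieceC (c : Int) (s' : List Char) : String :=
  "    " ++ String.ofList
    (if s' = [] then []
     else (if pvInd s' > c then List.replicate (pvInd s' - c).toNat ' ' else [])
       ++ s'.dropWhile PySem.Chars.isspace) ++ "\n"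

def pvPiecesC : Int → List (List Char) → List String
  | _, [] => []
  | c, s :: r =>
    pvPieceC (pvCupC c (PySem.Chars.rstrip s)) (PySem.Chars.rstrip s)
      :: pvPiecesC (pvCupC c (PySem.Chars.rstrip s)) r

-- the lines of t split on '\n' (Python's "t".split("\n"))
def pvLines : List Char → List (List Char)
  | [] => [[]]
  | c :: r => if c = '\n' then [] :: pvLines r else (c :: (pvLines r).headI) :: (pvLines r).tail

theorem pv_headI_tail {α : Type} [Inhabited α] (l : List α) (h : l ≠ []) : l.headI :: l.tail = l := by
  cases l with
  | nil => exact absurd rfl h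
  | cons a r => rfl

theorem pvLines_ne_nil (t : List Char) : pvLines t ≠ [] := by
  cases t with
  | nil => simp [pvLines]
  | cons c r => by_cases h : c = '\n' <;> simp [pvLines, h]

theorem pvLines_not_mem : ∀ (t : List Char), '\n' ∉ t → pvLines t = [t] := by
  intro t
  induction t with
  | nil => intro _; rfl
  | cons c r ih =>
    intro hm
    have hc : ¬ c = '\n' := fun h => hm (h ▸ List.mem_cons_self)
    have hr : '\n' ∉ r := fun h => hm (List.mem_cons_of_mem _ h)
    simp [pvLines, hc, ih hr]

theorem pvLines_mem : ∀ (t : List Char), '\n' ∈ t →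
    pvLines t = t.takeWhile (fun c => c != '\n')
      :: pvLines (t.drop ((t.takeWhile (fun c => c != '\n')).length + 1)) := by
  intro t
  induction t with
  | nil => intro h; exact absurd h (List.not_mem_nil)
  | cons c r ih =>
    intro hm
    by_cases hc : c = '\n'
    · subst hc; simp [pvLines]
    · have hr : '\n' ∈ r := by
        rcases List.mem_cons.mp hm with h | h
        · exact absurd h.symm hc
        · exact h
      have htw : (c :: r).takeWhile (fun c => c != '\n')
          = c :: r.takeWhile (fun c => c != '\n') := by
        rw [List.takeWhile_cons]; simp [hc]
      rw [htw]
      simp only [pvLines, if_neg hc, ih hr]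
      simp

-- PySem's splitOn on the single-char separator '\n' is pvLines
theorem pv_go : ∀ (fuel : Nat) (t cur : List Char) (acc : List (List Char)), t.length ≤ fuel →
    PySem.Chars.splitOn.go ['\n'] fuel t cur acc
      = acc.reverse ++ ((cur.reverse ++ (pvLines t).headI) :: (pvLines t).tail) := by
  intro fuel
  induction fuel with
  | zero =>
    intro t cur acc ht
    have : t = [] := List.eq_nil_of_length_eq_zero (by omega)
    subst this
    rw [PySem.Chars.splitOn.go]
    simp [pvLines]
  | succ fuel ih =>
    intro t cur acc ht
    cases t with
    | nil =>
      rw [PySem.Chars.splitOn.go]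
      · simp [pvLines]
      · omega
    | cons c rest =>
      by_cases hc : c = '\n'
      · subst hc
        have h2 : PySem.Chars.splitOn.go ['\n'] (fuel+1) ('\n' :: rest) cur acc
            = PySem.Chars.splitOn.go ['\n'] fuel rest [] (cur.reverse :: acc) := by
          rw [PySem.Chars.splitOn.go]
          simp only [List.isPrefixOf, Bool.and_eq_true, beq_iff_eq]
          split
          next => rfl
          next hh => simp at hh
        rw [h2, ih rest [] (cur.reverse :: acc) (by simpa using Nat.le_of_succ_le_succ ht)]
        have hne := pvLines_ne_nil rest
        have hl : pvLines ('\n' :: rest) = [] :: pvLines rest := by simp [pvLines]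
        rw [hl]
        simp only [List.headI_cons, List.tail_cons, List.append_nil, List.reverse_nil,
          List.nil_append, List.reverse_cons, List.append_assoc, List.singleton_append]
        rw [pv_headI_tail _ hne]
      · have h1 : PySem.Chars.splitOn.go ['\n'] (fuel+1) (c :: rest) cur acc
            = PySem.Chars.splitOn.go ['\n'] fuel rest (c :: cur) acc := by
          rw [PySem.Chars.splitOn.go]
          simp only [List.isPrefixOf, Bool.and_eq_true, beq_iff_eq]
          split
          next hh => exact absurd hh.1.symm hc
          next => rfl
        rw [h1, ih rest (c :: cur) acc (by simpa using Nat.le_of_succ_le_succ ht)]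
        simp [pvLines, hc]

theorem pv_splitOn_nl (t : List Char) : PySem.Chars.splitOn t ['\n'] = pvLines t := by
  unfold PySem.Chars.splitOn
  rw [pv_go (t.length + 1) t [] [] (by omega)]
  simp only [List.reverse_nil, List.nil_append]
  rw [pv_headI_tail _ (pvLines_ne_nil t)]

-- generic string facts used below
theorem pv_append_assoc (a b c : String) : a ++ b ++ c = a ++ (b ++ c) := by
  apply String.toList_injective; simp

theorem pv_intercalate_nil : ∀ (l : List (List Char)),
    List.intercalate ([] : List Char) l = l.flatten
  | [] => rfl
  | [a] => by simp [List.intercalate]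
  | a :: b :: r => by
    have ih := pv_intercalate_nil (b :: r)
    simp only [List.intercalate, List.intersperse] at *
    simp_all

theorem pv_join_nil : PySem.Str.join "" [] = "" := rfl

theorem pv_join_cons (x : String) (r : List String) :
    PySem.Str.join "" (x :: r) = x ++ PySem.Str.join "" r := by
  apply String.toList_injective
  simp [PySem.Str.join, PySem.Chars.join, pv_intercalate_nil]

theorem pv_join_append (xs ys : List String) :
    PySem.Str.join "" (xs ++ ys) = PySem.Str.join "" xs ++ PySem.Str.join "" ys := by
  induction xs with
  | nil =>
    apply String.toList_injective
    simp [PySem.Str.join, PySem.Chars.join, pv_intercalate_nil]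
  | cons x r ih =>
    simp only [List.cons_append, pv_join_cons, ih, pv_append_assoc]

theorem pv_dropWhile_eq_drop (p : Char → Bool) : ∀ (l : List Char),
    l.dropWhile p = l.drop (l.takeWhile p).length := by
  intro l
  induction l with
  | nil => rfl
  | cons c r ih =>
    by_cases h : p c
    · simp [h, ih]
    · simp [h]

theorem pv_rstrip_append_space (xs : List Char) (c : Char)
    (hc : PySem.Chars.isspace c = true) :
    PySem.Chars.rstrip (xs ++ [c]) = PySem.Chars.rstrip xs := by
  simp [PySem.Chars.rstrip, hc]

theorem pv_rstrip_append_keep (xs : List Char) (c : Char)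
    (hc : ¬ PySem.Chars.isspace c = true) :
    PySem.Chars.rstrip (xs ++ [c]) = xs ++ [c] := by
  simp [PySem.Chars.rstrip, hc]

theorem pv_rstrip_prefix (s : List Char) : PySem.Chars.rstrip s <+: s := by
  unfold PySem.Chars.rstrip
  have h := List.reverse_prefix.mpr (List.dropWhile_suffix (l := s.reverse) PySem.Chars.isspace)
  rwa [List.reverse_reverse] at h

-- rstrip s ends with a non-space (when nonempty), so its space prefix is proper
theorem pv_takeWhile_rstrip_lt (s : List Char) (h : PySem.Chars.rstrip s ≠ []) :
    ((PySem.Chars.rstrip s).takeWhile PySem.Chars.isspace).length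
      < (PySem.Chars.rstrip s).length := by
  rcases Nat.lt_or_ge ((PySem.Chars.rstrip s).takeWhile PySem.Chars.isspace).length
      (PySem.Chars.rstrip s).length with hlt | hge
  · exact hlt
  · exfalso
    have hpre := List.takeWhile_prefix (l := PySem.Chars.rstrip s) PySem.Chars.isspace
    have heq : (PySem.Chars.rstrip s).takeWhile PySem.Chars.isspace = PySem.Chars.rstrip s :=
      hpre.eq_of_length (Nat.le_antisymm hpre.length_le hge)
    have hall := List.takeWhile_eq_self_iff.mp heq
    have hdne : s.reverse.dropWhile PySem.Chars.isspace ≠ [] := by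
      intro hx
      apply h
      unfold PySem.Chars.rstrip
      rw [hx, List.reverse_nil]
    have hhead := List.head_dropWhile_not PySem.Chars.isspace hdne
    have hmem : (s.reverse.dropWhile PySem.Chars.isspace).head hdne ∈ PySem.Chars.rstrip s := by
      unfold PySem.Chars.rstrip
      rw [List.mem_reverse]
      exact List.head_mem hdne
    have hsp := hall _ hmem
    rw [hhead] at hsp
    exact Bool.false_ne_true hsp

theorem pvRTrim_spec : ∀ (n : Nat) (l : List Char) (i e : Nat), e - i ≤ n → i ≤ e → e ≤ l.length →
    pvRTrim l i e = i + (PySem.Chars.rstrip ((l.drop i).take (e - i))).length := by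
  intro n
  induction n with
  | zero =>
    intro l i e hn hie hel
    have he : e = i := by omega
    subst he
    rw [pvRTrim]
    simp [PySem.Chars.rstrip]
  | succ n ih =>
    intro l i e hn hie hel
    by_cases hlt : i < e
    · have he1 : e - 1 < l.length := by omega
      have hget : l.getD (e - 1) ' ' = l[e - 1] := List.getD_eq_getElem l ' ' he1
      have hslen : ((l.drop i).take (e - i)).length = e - i := by
        simp; omega
      have hsne : (l.drop i).take (e - i) ≠ [] := by
        intro hx; rw [hx] at hslen; simp at hslen; omega
      have hlast : ((l.drop i).take (e - i)).getLast hsne = l[e - 1] := by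
        rw [List.getLast_eq_getElem]
        have h1 : ((l.drop i).take (e - i))[((l.drop i).take (e - i)).length - 1]'(by omega)
            = (l.drop i)[((l.drop i).take (e - i)).length - 1]'(by simp; omega) :=
          List.getElem_take
        rw [h1, List.getElem_drop]
        congr 1
        omega
      have hdl : ((l.drop i).take (e - i)).dropLast = (l.drop i).take (e - 1 - i) := by
        rw [List.dropLast_eq_take, hslen, List.take_take]
        congr 1
        omega
      have hsplit : (l.drop i).take (e - i)
          = (l.drop i).take (e - 1 - i) ++ [l[e - 1]] := by
        conv_lhs => rw [← List.dropLast_append_getLast hsne]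
        rw [hdl, hlast]
      by_cases hsp : PySem.Chars.isspace (l[e - 1]) = true
      · rw [pvRTrim, if_pos ⟨hlt, by rw [hget]; exact hsp⟩]
        rw [ih l i (e - 1) (by omega) (by omega) (by omega)]
        rw [hsplit, pv_rstrip_append_space _ _ hsp]
      · rw [pvRTrim, if_neg (by rw [hget]; intro hx; exact hsp hx.2)]
        rw [hsplit, pv_rstrip_append_keep _ _ hsp]
        rw [List.length_append, List.length_take]
        simp
        omega
    · have he : e = i := by omega
      subst he
      rw [pvRTrim]
      simp [PySem.Chars.rstrip]

theorem pvLTrim_spec : ∀ (n : Nat) (l : List Char) (b e : Nat), e - b ≤ n → b ≤ e → e ≤ l.length →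
    pvLTrim l b e = b + (((l.drop b).take (e - b)).takeWhile PySem.Chars.isspace).length := by
  intro n
  induction n with
  | zero =>
    intro l b e hn hbe hel
    have he : e = b := by omega
    subst he
    rw [pvLTrim]
    simp
  | succ n ih =>
    intro l b e hn hbe hel
    by_cases hlt : b < e
    · have hb : b < l.length := by omega
      have hget : l.getD b ' ' = l[b] := List.getD_eq_getElem l ' ' hb
      have hdrop : l.drop b = l[b] :: l.drop (b + 1) := List.drop_eq_getElem_cons hb
      have hcons : (l.drop b).take (e - b) = l[b] :: (l.drop (b + 1)).take (e - (b + 1)) := by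
        rw [hdrop]
        rw [show e - b = (e - (b + 1)) + 1 by omega]
        rfl
      by_cases hsp : PySem.Chars.isspace (l[b]) = true
      · rw [pvLTrim, if_pos ⟨hlt, by rw [hget]; exact hsp⟩]
        rw [ih l (b + 1) e (by omega) (by omega) (by omega)]
        rw [hcons, List.takeWhile_cons, hsp]
        simp
        omega
      · rw [pvLTrim, if_neg (by rw [hget]; intro hx; exact hsp hx.2)]
        rw [hcons, List.takeWhile_cons]
        simp [hsp]
    · have he : e = b := by omega
      subst he
      rw [pvLTrim]
      simp

-- one line's pointer data, expressed through rstrip/takeWhile of the line's chars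
theorem pv_body (l : List Char) (i endp : Nat) (hie : i ≤ endp) (hel : endp ≤ l.length) :
    pvRTrim l i endp = i + (PySem.Chars.rstrip ((l.drop i).take (endp - i))).length
    ∧ pvLTrim l i (pvRTrim l i endp)
        = i + ((PySem.Chars.rstrip ((l.drop i).take (endp - i))).takeWhile
            PySem.Chars.isspace).length
    ∧ (l.drop (pvLTrim l i (pvRTrim l i endp))).take
          (pvRTrim l i endp - pvLTrim l i (pvRTrim l i endp))
        = (PySem.Chars.rstrip ((l.drop i).take (endp - i))).dropWhile PySem.Chars.isspace
    ∧ (pvLTrim l i (pvRTrim l i endp) < pvRTrim l i endp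
        ↔ PySem.Chars.rstrip ((l.drop i).take (endp - i)) ≠ []) := by
  have he := pvRTrim_spec (endp - i) l i endp le_rfl hie hel
  have hseglen : ((l.drop i).take (endp - i)).length = endp - i := by simp; omega
  have hm_le : (PySem.Chars.rstrip ((l.drop i).take (endp - i))).length ≤ endp - i := by
    have := (pv_rstrip_prefix ((l.drop i).take (endp - i))).length_le
    omega
  have hrs_pre : PySem.Chars.rstrip ((l.drop i).take (endp - i)) <+: l.drop i :=
    (pv_rstrip_prefix _).trans (List.take_prefix _ _)
  have htake_rs : (l.drop i).take (PySem.Chars.rstrip ((l.drop i).take (endp - i))).length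
      = PySem.Chars.rstrip ((l.drop i).take (endp - i)) :=
    (List.prefix_iff_eq_take.mp hrs_pre).symm
  have he_le : pvRTrim l i endp ≤ l.length := by omega
  have hb := pvLTrim_spec ((pvRTrim l i endp) - i) l i (pvRTrim l i endp) le_rfl
    (by omega) he_le
  rw [show pvRTrim l i endp - i
      = (PySem.Chars.rstrip ((l.drop i).take (endp - i))).length from by omega, htake_rs] at hb
  have hk_le : ((PySem.Chars.rstrip ((l.drop i).take (endp - i))).takeWhile
      PySem.Chars.isspace).length ≤ (PySem.Chars.rstrip ((l.drop i).take (endp - i))).length :=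
    (List.takeWhile_prefix _).length_le
  refine ⟨he, hb, ?_, ?_⟩
  · rw [hb, he]
    rw [show l.drop (i + ((PySem.Chars.rstrip ((l.drop i).take (endp - i))).takeWhile
        PySem.Chars.isspace).length) = (l.drop i).drop (((PySem.Chars.rstrip
        ((l.drop i).take (endp - i))).takeWhile PySem.Chars.isspace).length) from
      (List.drop_drop).symm]
    rw [show i + (PySem.Chars.rstrip ((l.drop i).take (endp - i))).length
        - (i + ((PySem.Chars.rstrip ((l.drop i).take (endp - i))).takeWhile
            PySem.Chars.isspace).length)
        = (PySem.Chars.rstrip ((l.drop i).take (endp - i))).length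
          - ((PySem.Chars.rstrip ((l.drop i).take (endp - i))).takeWhile
              PySem.Chars.isspace).length from by omega]
    rw [← List.drop_take, htake_rs]
    exact (pv_dropWhile_eq_drop _ _).symm
  · rw [hb, he]
    constructor
    · intro hlt hx
      rw [hx] at hlt
      simp at hlt
    · intro hne
      have := pv_takeWhile_rstrip_lt _ hne
      omega

-- the pad+body piece equals pvPieceC (nonempty line)
theorem pv_piece_str (c' : Int) (ind : Int) (s' : List Char) (hind : ind = pvInd s')
    (hne : s' ≠ []) :
    "    " ++ String.ofList (List.replicate (if ind > c' then ind - c' else 0).toNat ' ')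
      ++ String.ofList (s'.dropWhile PySem.Chars.isspace) ++ "
" = pvPieceC c' s' := by
  subst hind
  by_cases hgt : pvInd s' > c'
  · apply String.toList_injective; simp [pvPieceC, hne, hgt]
  · apply String.toList_injective; simp [pvPieceC, hne, hgt]

theorem pv_piece_empty (c' : Int) : ("    \n" : String) = pvPieceC c' [] := by
  apply String.toList_injective; simp [pvPieceC]

-- processing the terminal (newline-free) suffix
theorem pvLoop_last (l : List Char) (i : Nat) (hi : i ≤ l.length) (hm : '\n' ∉ l.drop i)
    (c : Int) (out : List String) :
    pvLoop l i c out = out ++ pvPiecesC c (pvLines (l.drop i)) := by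
  have hj := pvFindNl_not_mem (l.length - i) l i le_rfl hm
  obtain ⟨he, hb, hslice, hiff⟩ := pv_body l i l.length hi le_rfl
  have hseg : (l.drop i).take (l.length - i) = l.drop i := by
    apply List.take_of_length_le
    simp
  rw [hseg] at he hb hslice hiff
  rw [pvLoop]
  dsimp only
  rw [hj]
  have hc0 : ((-1 : Int) < 0) := by norm_num
  simp only [if_pos hc0]
  rw [pvLines_not_mem _ hm]
  simp only [pvPiecesC]
  by_cases hne : PySem.Chars.rstrip (l.drop i) = []
  · simp only [if_neg (show ¬ pvLTrim l i (pvRTrim l i l.length) < pvRTrim l i l.length from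
      by rw [hiff]; simp [hne])]
    rw [hne]
    have hcup : pvCupC c ([] : List Char) = c := by simp [pvCupC]
    rw [hcup, ← pv_piece_empty]
  · simp only [if_pos (hiff.mpr hne)]
    rw [hslice, hb]
    have hindc : ((i + ((PySem.Chars.rstrip (l.drop i)).takeWhile
        PySem.Chars.isspace).length : Nat) : Int) - (i : Int)
        = pvInd (PySem.Chars.rstrip (l.drop i)) := by
      unfold pvInd; push_cast; ring
    rw [hindc]
    have hcup : (if c < 0 then pvInd (PySem.Chars.rstrip (l.drop i)) else c)
        = pvCupC c (PySem.Chars.rstrip (l.drop i)) := by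
      by_cases hc : c < 0 <;> simp [pvCupC, hc, hne]
    rw [hcup]
    rw [pv_piece_str _ _ _ rfl hne]

theorem pvLoop_spec : ∀ (n : Nat) (l : List Char) (i : Nat), l.length - i ≤ n → i ≤ l.length →
    ∀ (c : Int) (out : List String),
    pvLoop l i c out = out ++ pvPiecesC c (pvLines (l.drop i)) := by
  intro n
  induction n with
  | zero =>
    intro l i hn hi c out
    have : i = l.length := by omega
    subst this
    exact pvLoop_last l l.length le_rfl (by simp) c out
  | succ n ih =>
    intro l i hn hi c out
    by_cases hm : '\n' ∈ l.drop i
    · have hj := pvFindNl_mem (l.length - i) l i le_rfl hm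
      have hlen_lt : ((l.drop i).takeWhile (fun c => c != '\n')).length < l.length - i := by
        have := pv_takeWhile_lt hm
        simpa using this
      rw [pvLoop]
      dsimp only
      rw [hj]
      have hnneg : ¬ ((i : Int) + (((l.drop i).takeWhile (fun c => c != '\n')).length : Int)
          < 0) := by omega
      simp only [if_neg hnneg]
      rw [show ((i : Int) + (((l.drop i).takeWhile (fun c => c != '\n')).length : Int)).toNat
          = i + ((l.drop i).takeWhile (fun c => c != '\n')).length from by omega]
      obtain ⟨he, hb, hslice, hiff⟩ :=
        pv_body l i (i + ((l.drop i).takeWhile (fun c => c != '\n')).length)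
          (by omega) (by omega)
      have hseg : (l.drop i).take
          (i + ((l.drop i).takeWhile (fun c => c != '\n')).length - i)
          = (l.drop i).takeWhile (fun c => c != '\n') := by
        rw [show i + ((l.drop i).takeWhile (fun c => c != '\n')).length - i
            = ((l.drop i).takeWhile (fun c => c != '\n')).length from by omega]
        exact (List.prefix_iff_eq_take.mp (List.takeWhile_prefix _)).symm
      rw [hseg] at he hb hslice hiff
      have hrec := ih l (i + ((l.drop i).takeWhile (fun c => c != '\n')).length + 1)
        (by omega) (by omega)
      have hdd : l.drop (i + ((l.drop i).takeWhile (fun c => c != '\n')).length + 1)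
          = (l.drop i).drop (((l.drop i).takeWhile (fun c => c != '\n')).length + 1) := by
        rw [List.drop_drop, Nat.add_assoc]
      have hlines := pvLines_mem (l.drop i) hm
      by_cases hne : PySem.Chars.rstrip ((l.drop i).takeWhile (fun c => c != '\n')) = []
      · simp only [if_neg (show ¬ pvLTrim l i (pvRTrim l i (i + ((l.drop i).takeWhile
            (fun c => c != '\n')).length)) < pvRTrim l i (i + ((l.drop i).takeWhile
            (fun c => c != '\n')).length) from by rw [hiff]; simp [hne])]
        rw [hrec, hdd, hlines]
        simp only [pvPiecesC]
        rw [hne]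
        have hcup : pvCupC c ([] : List Char) = c := by simp [pvCupC]
        rw [hcup, ← pv_piece_empty]
        simp
      · simp only [if_pos (hiff.mpr hne)]
        rw [hslice, hb]
        have hindc : ((i + ((PySem.Chars.rstrip ((l.drop i).takeWhile
            (fun c => c != '\n'))).takeWhile PySem.Chars.isspace).length : Nat) : Int)
            - (i : Int)
            = pvInd (PySem.Chars.rstrip ((l.drop i).takeWhile (fun c => c != '\n'))) := by
          unfold pvInd; push_cast; ring
        rw [hindc]
        have hcup : (if c < 0
            then pvInd (PySem.Chars.rstrip ((l.drop i).takeWhile (fun c => c != '\n')))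
            else c)
            = pvCupC c (PySem.Chars.rstrip ((l.drop i).takeWhile (fun c => c != '\n'))) := by
          by_cases hc : c < 0 <;> simp [pvCupC, hc, hne]
        rw [hcup]
        rw [pv_piece_str _ _ _ rfl hne]
        rw [hrec, hdd, hlines]
        simp only [pvPiecesC]
        simp
    · exact pvLoop_last l i hi hm c out

theorem pvAStep_char (c : Int) (d : String) (s : List Char) :
    pvAStep (c, d) (String.ofList s)
      = (pvCupC c (PySem.Chars.rstrip s),
         d ++ pvPieceC (pvCupC c (PySem.Chars.rstrip s)) (PySem.Chars.rstrip s)) := by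
  have hrs : PySem.Str.rstrip (String.ofList s) = String.ofList (PySem.Chars.rstrip s) := by
    apply String.toList_injective; simp
  unfold pvAStep
  dsimp only
  rw [hrs]
  generalize PySem.Chars.rstrip s = s'
  have hlen : PySem.Str.len (String.ofList s') = (s'.length : Int) := by
    rw [PySem.Str.len_eq]; simp
  have hls : PySem.Str.lstrip (String.ofList s')
      = String.ofList (s'.dropWhile PySem.Chars.isspace) := by
    apply String.toList_injective; simp [PySem.Chars.lstrip]
  have htl := congrArg List.length
    (List.takeWhile_append_dropWhile (p := PySem.Chars.isspace) (l := s'))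
  rw [List.length_append] at htl
  have hlen2 : PySem.Str.len (String.ofList (s'.dropWhile PySem.Chars.isspace))
      = ((s'.dropWhile PySem.Chars.isspace).length : Int) := by
    rw [PySem.Str.len_eq]; simp
  rw [hls, hlen, hlen2]
  have hind : (s'.length : Int) - ((s'.dropWhile PySem.Chars.isspace).length : Int)
      = pvInd s' := by
    unfold pvInd; omega
  rw [hind]
  by_cases hne : s' = []
  · subst hne
    have h0 : ¬ ((([] : List Char).length : Int) ≠ 0) := by simp
    rw [if_neg h0, if_neg h0, ite_self]
    have hcup : pvCupC c ([] : List Char) = c := by simp [pvCupC]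
    rw [hcup]
    refine Prod.ext rfl ?_
    apply String.toList_injective
    simp [pvPieceC]
  · have hlz : (((s'.length : Nat) : Int) ≠ 0) := by
      simp [List.length_eq_zero_iff]; exact hne
    rw [if_pos hlz, if_pos hlz]
    have hcup : (if c < 0 then pvInd s' else c) = pvCupC c s' := by
      by_cases hc : c < 0 <;> simp [pvCupC, hc, hne]
    rw [hcup]
    refine Prod.ext rfl ?_
    by_cases hgt : pvInd s' > pvCupC c s'
    · rw [if_pos hgt]
      apply String.toList_injective
      simp [pvPieceC, pvSpaces, hne, hgt]
    · rw [if_neg hgt]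
      apply String.toList_injective
      simp [pvPieceC, hne, hgt]

theorem pvA_fold : ∀ (ls : List (List Char)) (c : Int) (d : String),
    ((ls.map String.ofList).foldl pvAStep (c, d)).2 = d ++ PySem.Str.join "" (pvPiecesC c ls) := by
  intro ls
  induction ls with
  | nil =>
    intro c d
    apply String.toList_injective
    simp [pvPiecesC, pv_join_nil]
  | cons s r ih =>
    intro c d
    simp only [List.map_cons, List.foldl_cons, pvAStep_char, pvPiecesC, pv_join_cons, ih,
      pv_append_assoc]

-- ===== VERDICT =====
theorem create_example_rst_spec : Claim_equal_create_example_rst := by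
  intro example_ showex _
  unfold Spec_create_example_rst create_example_rst create_example_rst_alt
  dsimp only
  have hsplit : (PySem.Str.split? example_ "\n").getD []
      = (pvLines example_.toList).map String.ofList := by
    have h1 : ("\n" : String).toList = ['\n'] := by decide
    simp [PySem.Str.split?, PySem.Chars.split?, h1, pv_splitOn_nl]
  rw [hsplit, pvA_fold, pvLoop_spec example_.toList.length example_.toList 0 (by omega) (by omega)]
  rw [List.drop_zero]
  simp only [List.cons_append, List.nil_append]
  rw [pv_join_cons, pv_join_append, pv_join_cons, pv_join_nil]
  rw [pv_append_assoc]
  congr 1
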